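-- pv_equiv track=rewrite | github.com/deadman96385/PatchDoctor | patchdoctor.py | _split_patch_by_file
-- ===== SOURCE A (Python) =====
-- from typing import Any, Dict, List, Optional, Tuple, Union
--
-- def _split_patch_by_file(patch_content: str) -> List[str]:
--     """Split patch by individual files."""
--     patches = []
--     lines = patch_content.split('\n')
--
--     # Find header (everything before first diff --git)
--     header = []
--     diff_start = -1
--     for i, line in enumerate(lines):
--         if line.startswith('diff --git'):
--             diff_start = i
--             break
--         header.append(line)
--
--     if diff_start == -1:
--         # No diff --git found, return original
--         return [patch_content]
--
--     # Split by diff --git sections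
--     current_diff = []
--     for i in range(diff_start, len(lines)):
--         line = lines[i]
--         if line.startswith('diff --git') and current_diff:
--             # Start of new file, save current diff with header
--             patch = '\n'.join(header + current_diff)
--             patches.append(patch)
--             current_diff = [line]
--         else:
--             current_diff.append(line)
--
--     # Add the last patch
--     if current_diff:
--         patch = '\n'.join(header + current_diff)
--         patches.append(patch)
--
--     return patches
-- ===== SOURCE B (Python) =====
-- def _split_patch_by_file(patch_content):
--     """Split patch by individual files (boundary-index decomposition)."""
--     lines = patch_content.split('\n')
--     bounds = [i for i, line in enumerate(lines) if line.startswith('diff --git')]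
--     if not bounds:
--         return [patch_content]
--     header = lines[:bounds[0]]
--     return ['\n'.join(header + lines[s:e])
--             for s, e in zip(bounds, bounds[1:] + [len(lines)])]
-- ===== Notes on version B (the rewrite author's own statement) =====
-- stated objective: alternative
-- what changed: Replaces A's stateful single-pass accumulator (current_diff rebuilt and flushed at each file-boundary marker line) by a two-phase decomposition: one scan collecting the boundary indices, then slicing the line list between consecutive boundaries (with a length sentinel) and joining each slice after the shared header.
import Mathlib
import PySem

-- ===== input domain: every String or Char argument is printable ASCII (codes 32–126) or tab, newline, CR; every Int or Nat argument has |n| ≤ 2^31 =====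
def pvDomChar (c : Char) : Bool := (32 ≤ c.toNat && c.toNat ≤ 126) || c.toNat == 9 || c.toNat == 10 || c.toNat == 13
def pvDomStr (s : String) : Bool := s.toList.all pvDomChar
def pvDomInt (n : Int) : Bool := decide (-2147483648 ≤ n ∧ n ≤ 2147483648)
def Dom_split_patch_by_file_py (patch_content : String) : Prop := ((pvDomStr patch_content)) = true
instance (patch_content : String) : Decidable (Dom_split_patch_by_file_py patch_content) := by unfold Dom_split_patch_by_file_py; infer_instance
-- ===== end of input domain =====

-- B differs from A by decomposition only: boundary indices + slices instead of a flushed accumulator.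

-- ===== PORT A =====
-- first loop of A: walk the lines with an index, collecting header until the first
-- 'diff --git' line; returns (header, diff_start?) (none = not found, as diff_start = -1)
def pvHeaderScan : List String → Nat → (List String × Option Nat)
  | [], _ => ([], none)
  | l :: ls, i =>
    if PySem.Str.startswith l "diff --git" then ([], some i)
    else
      let (h, d) := pvHeaderScan ls (i + 1)
      (l :: h, d)

-- body of A's second loop (state = (patches, current_diff))
def pvStepA (header : List String) (st : List String × List String) (line : String) :
    List String × List String :=
  if PySem.Str.startswith line "diff --git" && !st.2.isEmpty then
    (st.1 ++ [PySem.Str.join "\n" (header ++ st.2)], [line])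
  else
    (st.1, st.2 ++ [line])

def split_patch_by_file_py (patch_content : String) : List String :=
  let lines := (PySem.Str.split? patch_content "\n").getD []
  let hd := pvHeaderScan lines 0
  match hd.2 with
  | none => [patch_content]
  | some d =>
    -- 'for i in range(diff_start, len(lines)): line = lines[i]' visits exactly lines.drop d
    let st := (lines.drop d).foldl (pvStepA hd.1) ([], [])
    if !st.2.isEmpty then st.1 ++ [PySem.Str.join "\n" (hd.1 ++ st.2)] else st.1

-- ===== PORT B =====
def split_patch_by_file_py_alt (patch_content : String) : List String :=
  let lines := (PySem.Str.split? patch_content "\n").getD []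
  let bounds := ((PySem.List.enumerate lines 0).filter
      (fun p => PySem.Str.startswith p.2 "diff --git")).map Prod.fst
  match bounds with
  | [] => [patch_content]
  | b0 :: _ =>
    let header := PySem.List.slice lines none (some b0)
    (bounds.zip (bounds.tail ++ [(lines.length : Int)])).map
      (fun p => PySem.Str.join "\n" (header ++ PySem.List.slice lines (some p.1) (some p.2)))

-- ===== PRECONDITION & SPEC =====
def Spec_split_patch_by_file_py (patch_content : String) (out : List String) : Prop := out = split_patch_by_file_py_alt patch_content
instance (patch_content : String) (out : List String) : Decidable (Spec_split_patch_by_file_py patch_content out) := by unfold Spec_split_patch_by_file_py; infer_instance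

-- ===== CLAIM (what is proved, stated in full; the proofs are below) =====
def Claim_equal_split_patch_by_file_py : Prop := ∀ (patch_content : String), Dom_split_patch_by_file_py patch_content → Spec_split_patch_by_file_py patch_content (split_patch_by_file_py patch_content)

-- ===== LEMMAS AND PROOFS =====

-- the boundary predicate
def Pb (l : String) : Bool := PySem.Str.startswith l "diff --git"

-- Nat-valued boundary indices (proof-side mirror of B's enumerate/filter/map)
def natIdxs : List String → Nat → List Nat
  | [], _ => []
  | x :: xs, s => if Pb x then s :: natIdxs xs (s + 1) else natIdxs xs (s + 1)

-- canonical segmentation (middle object relating both ports)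
def segs (cur : List String) : List String → List (List String)
  | [] => [cur]
  | l :: ls => if Pb l then cur :: segs [l] ls else segs (cur ++ [l]) ls

lemma headerScan_none : ∀ (xs : List String) (i : Nat),
    (pvHeaderScan xs i).2 = none → ∀ l ∈ xs, Pb l = false := by
  intro xs
  induction xs with
  | nil => intro i _ l hl; cases hl
  | cons x xs ih =>
    intro i h l hl
    by_cases hx : PySem.Str.startswith x "diff --git"
    · exfalso
      simp only [pvHeaderScan, hx, ite_true] at h
      exact Option.some_ne_none _ h
    · rcases hh : pvHeaderScan xs (i+1) with ⟨h', d'⟩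
      simp only [pvHeaderScan, hx, Bool.false_eq_true, ite_false, hh] at h
      rcases List.mem_cons.mp hl with rfl | hl
      · rw [Pb]; simpa using hx
      · exact ih (i+1) (by rw [hh]; simpa using h) l hl

lemma headerScan_some : ∀ (xs : List String) (i : Nat) (h : List String) (d : Nat),
    pvHeaderScan xs i = (h, some d) →
    (∀ l ∈ h, Pb l = false) ∧ d = i + h.length ∧
      ∃ y t, xs = h ++ y :: t ∧ Pb y = true := by
  intro xs
  induction xs with
  | nil => intro i h d hs; simp [pvHeaderScan] at hs
  | cons x xs ih =>
    intro i h d hs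
    by_cases hx : PySem.Str.startswith x "diff --git"
    · simp only [pvHeaderScan, hx, ite_true, Prod.mk.injEq, Option.some.injEq] at hs
      obtain ⟨rfl, rfl⟩ := hs
      exact ⟨by simp, by simp, x, xs, by simp, by rw [Pb]; exact hx⟩
    · rcases hh : pvHeaderScan xs (i+1) with ⟨h', d'⟩
      simp only [pvHeaderScan, hx, Bool.false_eq_true, ite_false, hh] at hs
      obtain ⟨rfl, rfl⟩ : x :: h' = h ∧ d' = some d := by
        simpa [Prod.ext_iff] using hs
      obtain ⟨hnb, hd, y, t, ht, hy⟩ := ih (i+1) h' d hh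
      refine ⟨?_, by simp [hd]; omega, y, t, by simp [ht], hy⟩
      intro l hl
      rcases List.mem_cons.mp hl with rfl | hl
      · rw [Pb]; simpa using hx
      · exact hnb l hl

lemma natIdxs_nil_of : ∀ (xs : List String), (∀ l ∈ xs, Pb l = false) → ∀ s, natIdxs xs s = [] := by
  intro xs
  induction xs with
  | nil => intro _ s; rfl
  | cons x xs ih =>
    intro h s
    have hx : Pb x = false := h x (by simp)
    simp only [natIdxs, hx, Bool.false_eq_true, ite_false]
    exact ih (fun l hl => h l (by simp [hl])) (s+1)

lemma natIdxs_skip : ∀ (a : List String), (∀ l ∈ a, Pb l = false) →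
    ∀ (r : List String) (s : Nat), natIdxs (a ++ r) s = natIdxs r (s + a.length) := by
  intro a
  induction a with
  | nil => intro _ r s; simp
  | cons x a ih =>
    intro h r s
    have hx : Pb x = false := h x (by simp)
    simp only [List.cons_append, natIdxs, hx, Bool.false_eq_true, ite_false]
    rw [ih (fun l hl => h l (by simp [hl])) r (s+1)]
    congr 1
    simp; omega

lemma natIdxs_shift : ∀ (xs : List String) (s t : Nat),
    natIdxs xs (s + t) = (natIdxs xs t).map (· + s) := by
  intro xs
  induction xs with
  | nil => intro s t; rfl
  | cons x xs ih =>
    intro s t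
    by_cases hx : Pb x
    · simp only [natIdxs, hx, ite_true, List.map_cons]
      rw [show s + t + 1 = s + (t + 1) by omega, ih s (t + 1), Nat.add_comm s t]
    · simp only [natIdxs, hx, Bool.false_eq_true, ite_false]
      rw [show s + t + 1 = s + (t + 1) by omega, ih s (t + 1)]

lemma segs_skip : ∀ (a : List String), (∀ l ∈ a, Pb l = false) →
    ∀ (r cur : List String), segs cur (a ++ r) = segs (cur ++ a) r := by
  intro a
  induction a with
  | nil => intro _ r cur; simp
  | cons x a ih =>
    intro h r cur
    have hx : Pb x = false := h x (by simp)
    simp only [List.cons_append, segs, hx, Bool.false_eq_true, ite_false]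
    rw [ih (fun l hl => h l (by simp [hl])) r (cur ++ [x])]
    simp

lemma castIdxs : ∀ (xs : List String) (s : Nat),
    ((PySem.List.enumerate xs ((s : Nat) : Int)).filter
        (fun p => PySem.Str.startswith p.2 "diff --git")).map Prod.fst
      = (natIdxs xs s).map (fun k => ((k : Nat) : Int)) := by
  intro xs
  induction xs with
  | nil => intro s; simp [PySem.List.enumerate_nil, natIdxs]
  | cons x xs ih =>
    intro s
    rw [PySem.List.enumerate_cons]
    have h1 : ((s : Int) + 1) = (((s + 1 : Nat)) : Int) := by push_cast; ring
    by_cases hx : PySem.Str.startswith x "diff --git"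
    · simp only [List.filter_cons, hx, natIdxs, Pb, ite_true, List.map_cons, h1, ih (s+1)]
    · simp only [List.filter_cons, hx, natIdxs, Pb, Bool.false_eq_true, ite_false, h1, ih (s+1)]

-- A's accumulator loop (with final flush) computes the canonical segmentation
lemma foldA : ∀ (ys patches cur header : List String), cur ≠ [] →
    (let st := ys.foldl (pvStepA header) (patches, cur);
     if !st.2.isEmpty then st.1 ++ [PySem.Str.join "\n" (header ++ st.2)] else st.1)
    = patches ++ (segs cur ys).map (fun seg => PySem.Str.join "\n" (header ++ seg)) := by
  intro ys
  induction ys with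
  | nil =>
    intro patches cur header hcur
    simp only [List.foldl_nil, segs, List.map_cons, List.map_nil]
    rw [if_pos (by simpa using hcur)]
  | cons l ls ih =>
    intro patches cur header hcur
    have hcur' : cur.isEmpty = false := by simpa [List.isEmpty_iff] using hcur
    by_cases hl : Pb l
    · have hl2 : PySem.Str.startswith l "diff --git" = true := by rw [Pb] at hl; exact hl
      have hstep : pvStepA header (patches, cur) l
          = (patches ++ [PySem.Str.join "\n" (header ++ cur)], [l]) := by
        simp only [pvStepA, hl2, hcur', Bool.not_false, Bool.and_true, ite_true]
      simp only [List.foldl_cons, hstep]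
      rw [ih (patches ++ [PySem.Str.join "\n" (header ++ cur)]) [l] header (by simp)]
      simp [segs, hl]
    · have hl2 : PySem.Str.startswith l "diff --git" = false := by
        rw [Pb] at hl; simpa using hl
      have hstep : pvStepA header (patches, cur) l = (patches, cur ++ [l]) := by
        simp only [pvStepA, hl2, Bool.false_and, Bool.false_eq_true, ite_false]
      simp only [List.foldl_cons, hstep]
      rw [ih patches (cur ++ [l]) header (by simp)]
      simp [segs, hl]

lemma first_split : ∀ (ys : List String),
    (∀ l ∈ ys, Pb l = false) ∨
      ∃ a y b, ys = a ++ y :: b ∧ (∀ l ∈ a, Pb l = false) ∧ Pb y = true := by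
  intro ys
  induction ys with
  | nil => left; intro l hl; cases hl
  | cons x xs ih =>
    by_cases hx : Pb x
    · right; exact ⟨[], x, xs, by simp, by simp, hx⟩
    · rcases ih with h | ⟨a, y, b, hab, ha, hy⟩
      · left; intro l hl
        rcases List.mem_cons.mp hl with rfl | hl
        · simpa using hx
        · exact h l hl
      · right
        refine ⟨x :: a, y, b, by simp [hab], ?_, hy⟩
        intro l hl
        rcases List.mem_cons.mp hl with rfl | hl
        · simpa using hx
        · exact ha l hl

-- zipping a mapped bounds list with its mapped sentinel is the mapped zip
lemma zip_sent_map {α β : Type} (f : α → β) : ∀ (u : List α) (n : α),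
    ((u.map f).zip ((u.map f).tail ++ [f n])) = (u.zip (u.tail ++ [n])).map (Prod.map f f) := by
  intro u n
  cases u with
  | nil => simp
  | cons x u =>
    simp only [List.map_cons, List.tail_cons]
    calc (f x :: u.map f).zip ((u.map f) ++ [f n])
        = ((x :: u).map f).zip ((u ++ [n]).map f) := by simp
      _ = ((x :: u).zip (u ++ [n])).map (Prod.map f f) := by rw [List.zip_map]
      _ = ((x :: u).zip ((x :: u).tail ++ [n])).map (Prod.map f f) := by simp

lemma zip_sent_map' {α β : Type} (f : α → β) (x : α) (u : List α) (n : α) :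
    ((f x :: u.map f).zip ((u.map f) ++ [f n])) = ((x :: u).zip (u ++ [n])).map (Prod.map f f) := by
  have h := zip_sent_map f (x :: u) n
  simpa using h

-- core: slicing between consecutive boundary indices is the canonical segmentation
lemma local_seg : ∀ (n : Nat) (ys : List String) (y : String), ys.length ≤ n → Pb y = true →
    ((natIdxs (y :: ys) 0).zip ((natIdxs (y :: ys) 0).tail ++ [(y :: ys).length])).map
        (fun p => ((y :: ys).drop p.1).take (p.2 - p.1))
      = segs [y] ys := by
  intro n
  induction n with
  | zero =>
    intro ys y hlen hy
    have : ys = [] := List.eq_nil_of_length_eq_zero (by omega)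
    subst this
    simp [natIdxs, hy, segs]
  | succ n ih =>
    intro ys y hlen hy
    rcases first_split ys with hnone | ⟨a, y1, b, hab, ha, hy1⟩
    · have h1 : natIdxs (y :: ys) 0 = [0] := by
        simp only [natIdxs, hy, ite_true]
        rw [natIdxs_nil_of ys hnone 1]
      rw [h1]
      have h2 : segs ([y] ++ ys) [] = [y :: ys] := by simp [segs]
      rw [show ys = ys ++ [] by simp, segs_skip ys hnone [] [y], h2]
      simp
    · subst hab
      set m := a.length + 1 with hm
      set v := natIdxs b 1 with hv
      set n' := (y1 :: b).length with hn'
      have hidx : natIdxs (y :: (a ++ y1 :: b)) 0 = 0 :: m :: v.map (· + m) := by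
        simp only [natIdxs, hy, ite_true]
        rw [natIdxs_skip a ha (y1 :: b) 1]
        have : natIdxs (y1 :: b) (1 + a.length) = m :: natIdxs b (m + 1) := by
          rw [show 1 + a.length = m by omega]
          simp [natIdxs, hy1]
        rw [this, show m + 1 = m + 1 by rfl, natIdxs_shift b m 1, hv]
      have hlen2 : (y :: (a ++ y1 :: b)).length = m + n' := by
        simp [hm, hn']; omega
      have hidxv : natIdxs (y1 :: b) 0 = 0 :: v := by simp [natIdxs, hy1, hv]
      -- rewrite the zipped list as head pair + mapped local zip
      have hzip : ((0 :: m :: v.map (· + m)).zip ((m :: v.map (· + m)) ++ [m + n']))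
          = (0, m) :: (((0 :: v).zip (v ++ [n'])).map (Prod.map (· + m) (· + m))) := by
        have e3 := zip_sent_map (· + m) (0 :: v) n'
        calc ((0 :: m :: v.map (· + m)).zip ((m :: v.map (· + m)) ++ [m + n']))
            = (0, m) :: ((m :: v.map (· + m)).zip ((v.map (· + m)) ++ [m + n'])) := by
              rw [List.cons_append, List.zip_cons_cons]
          _ = (0, m) :: (((0 :: v).map (· + m)).zip (((0 :: v).map (· + m)).tail ++ [n' + m])) := by
              simp only [List.map_cons, List.tail_cons, Nat.zero_add, Nat.add_comm m n']
          _ = (0, m) :: (((0 :: v).zip ((0 :: v).tail ++ [n'])).map (Prod.map (· + m) (· + m))) := by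
              rw [e3]
          _ = (0, m) :: (((0 :: v).zip (v ++ [n'])).map (Prod.map (· + m) (· + m))) := by
              simp
      rw [hidx, List.tail_cons, hlen2, hzip]
      simp only [List.map_cons]
      have hhead : ((y :: (a ++ y1 :: b)).drop (0 : Nat)).take (m - 0) = y :: a := by
        simp only [List.drop_zero, Nat.sub_zero]
        rw [show y :: (a ++ y1 :: b) = (y :: a) ++ (y1 :: b) by simp,
          show m = (y :: a).length by simp [hm], List.take_left]
      have htail :
          (((0 :: v).zip (v ++ [n'])).map (Prod.map (· + m) (· + m))).map
              (fun p => ((y :: (a ++ y1 :: b)).drop p.1).take (p.2 - p.1))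
            = ((0 :: v).zip (v ++ [n'])).map
                (fun p => ((y1 :: b).drop p.1).take (p.2 - p.1)) := by
        rw [List.map_map]
        apply List.map_congr_left
        intro p _
        simp only [Function.comp, Prod.map_fst, Prod.map_snd]
        have hdrop : (y :: (a ++ y1 :: b)).drop (p.1 + m) = (y1 :: b).drop p.1 := by
          rw [show y :: (a ++ y1 :: b) = (y :: a) ++ (y1 :: b) by simp,
            show p.1 + m = (y :: a).length + p.1 by simp [hm]; omega,
            ← List.drop_drop, List.drop_left]
        rw [hdrop, show p.2 + m - (p.1 + m) = p.2 - p.1 by omega]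
      rw [htail]
      have hb : b.length ≤ n := by
        simp only [List.length_append, List.length_cons] at hlen; omega
      have hihb := ih b y1 hb hy1
      rw [hidxv, List.tail_cons] at hihb
      rw [show ((y1 :: b).length) = n' by rw [hn']] at hihb
      rw [hihb]
      have hsegs : segs [y] (a ++ y1 :: b) = (y :: a) :: segs [y1] b := by
        rw [segs_skip a ha (y1 :: b) [y]]
        simp [segs, hy1]
      rw [hsegs, hhead]

-- ===== VERDICT (by name: the statement is the Claim_ definition above) =====
theorem split_patch_by_file_py_spec : Claim_equal_split_patch_by_file_py := by
  intro s _
  unfold Spec_split_patch_by_file_py split_patch_by_file_py split_patch_by_file_py_alt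
  set lines := (PySem.Str.split? s "\n").getD [] with hlines
  have hcast := castIdxs lines 0
  rw [show ((0 : Nat) : Int) = (0 : Int) by simp] at hcast
  rcases hscan : pvHeaderScan lines 0 with ⟨h, d?⟩
  cases d? with
  | none =>
    have hnone : ∀ l ∈ lines, Pb l = false := headerScan_none lines 0 (by rw [hscan])
    have hne : natIdxs lines 0 = [] := natIdxs_nil_of lines hnone 0
    rw [hne] at hcast
    simp only [hscan, hcast, List.map_nil]
  | some d =>
    obtain ⟨hh, hd, y, t, hsplit, hy⟩ := headerScan_some lines 0 h d hscan
    have hdlen : d = h.length := by simpa using hd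
    -- A side
    have hdropd : lines.drop d = y :: t := by
      rw [hsplit, hdlen, List.drop_left]
    have hstep0 : pvStepA h (([] : List String), ([] : List String)) y = ([], [y]) := by
      simp [pvStepA]
    -- B side boundary indices
    have hnat : natIdxs lines 0 = (0 :: natIdxs t 1).map (· + h.length) := by
      rw [hsplit, natIdxs_skip h hh (y :: t) 0, show 0 + h.length = h.length + 0 by omega,
        natIdxs_shift (y :: t) h.length 0]
      congr 1
      simp [natIdxs, hy]
    have hboundsg : (natIdxs lines 0).map (fun k => ((k : Nat) : Int))
        = (fun k => ((k + h.length : Nat) : Int)) 0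
            :: (natIdxs t 1).map (fun k => ((k + h.length : Nat) : Int)) := by
      rw [hnat, List.map_map]
      simp [Function.comp]
    rw [hboundsg] at hcast
    have hsent : ((lines.length : Nat) : Int)
        = (fun k => ((k + h.length : Nat) : Int)) ((y :: t).length) := by
      rw [hsplit]
      simp
      ring
    have hslice0 : PySem.List.slice lines none (some ((fun k => ((k + h.length : Nat) : Int)) 0)) = h := by
      show PySem.List.slice lines none (some (((0 + h.length : Nat) : Int))) = h
      rw [PySem.List.slice_to_natCast, hsplit]
      simp
    have hsliceq : ∀ q : Nat × Nat,
        PySem.List.slice lines (some ((fun k => ((k + h.length : Nat) : Int)) q.1))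
            (some ((fun k => ((k + h.length : Nat) : Int)) q.2))
          = ((y :: t).drop q.1).take (q.2 - q.1) := by
      intro q
      show PySem.List.slice lines (some ((q.1 + h.length : Nat) : Int))
          (some ((q.2 + h.length : Nat) : Int)) = ((y :: t).drop q.1).take (q.2 - q.1)
      rw [PySem.List.slice_natCast, hsplit,
        show q.1 + h.length = h.length + q.1 by omega, ← List.drop_drop, List.drop_left,
        show q.2 + h.length - (h.length + q.1) = q.2 - q.1 by omega]
    have hloc := local_seg t.length t y le_rfl hy
    rw [show natIdxs (y :: t) 0 = 0 :: natIdxs t 1 from by simp [natIdxs, hy],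
      List.tail_cons] at hloc
    -- assemble
    simp only [hscan, hcast, hdropd, List.foldl_cons, hstep0, List.tail_cons, hsent,
      zip_sent_map' (fun k => ((k + h.length : Nat) : Int)) 0 (natIdxs t 1) ((y :: t).length),
      hslice0, List.map_map]
    rw [foldA t [] [y] h (by simp)]
    rw [← hloc, List.map_map]
    apply List.map_congr_left
    intro q _
    simp only [Function.comp, Prod.map_fst, Prod.map_snd, hsliceq q]
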